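-- pv_equiv track=rewrite | github.com/fbkarsdorp/deepflow-analysis | data/rhyme_features.py | get_final_phonology
-- ===== SOURCE A (Python) =====
-- def get_final_phonology(phon):
--     rhyme = []
--     for ph in phon.split():
--         if ph.endswith('1'):
--             if rhyme:
--                 raise ValueError
--             else:
--                 rhyme.append(ph)
--         else:
--             if rhyme:
--                 rhyme.append(ph)
--
--     # remove post-stress consontans for monosyllables
--     # up/cut, know/coast, time/high, etc...
--     nsylls = len([ph for ph in phon.split() if ph[-1].isdigit()])
--     if nsylls == 1:
--         rhyme = [ph for ph in rhyme if ph[-1].isdigit()]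
--
--     return rhyme
-- ===== SOURCE B (Python) =====
-- def get_final_phonology(phon):
--     tokens = phon.split()
--     stress = [i for i, t in enumerate(tokens) if t.endswith('1')]
--     if len(stress) > 1:
--         raise ValueError
--     rhyme = tokens[stress[0]:] if stress else []
--     digit_final = [t for t in tokens if t[-1].isdigit()]
--     if len(digit_final) == 1:
--         rhyme = [t for t in rhyme if t[-1].isdigit()]
--     return rhyme
-- ===== Notes on version B (the rewrite author's own statement) =====
-- stated objective: simpler
-- what changed: Replaces the accumulate-while-scanning loop (append-once-stressed with a raise guard inside the loop) by an index-first pass: collect the indices of stress-marked tokens, raise if more than one, and take the tail slice tokens[first:] directly.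
import Mathlib
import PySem

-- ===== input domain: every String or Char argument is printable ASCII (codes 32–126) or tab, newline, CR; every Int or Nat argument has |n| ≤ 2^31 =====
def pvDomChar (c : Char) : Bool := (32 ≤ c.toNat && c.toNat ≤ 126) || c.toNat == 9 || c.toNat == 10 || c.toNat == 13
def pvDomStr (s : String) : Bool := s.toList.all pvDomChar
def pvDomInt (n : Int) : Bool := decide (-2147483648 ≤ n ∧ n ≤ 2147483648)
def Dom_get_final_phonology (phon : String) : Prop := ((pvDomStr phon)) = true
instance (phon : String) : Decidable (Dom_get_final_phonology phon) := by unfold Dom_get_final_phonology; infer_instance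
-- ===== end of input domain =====

-- B replaces A's accumulate-while-scanning loop with an index-first pass and a tail slice (objective: simpler).

-- ph[-1].isdigit() — exact for the nonempty tokens phon.split() produces (split() never yields "")
def pvLastIsDigit (ph : String) : Bool :=
  match PySem.Str.pyGet? ph (-1) with
  | some c => PySem.Chars.isdigit c
  | none => false

-- ===== PORT A =====
-- A's for-loop over phon.split() with the accumulating `rhyme`; `none` = the ValueError branch (excluded by Pre_)
def pvA_loop : List String → List String → Option (List String)
  | [], rhyme => some rhyme
  | ph :: rest, rhyme =>
    if PySem.Str.endswith ph "1" then
      if rhyme ≠ [] then none else pvA_loop rest (rhyme ++ [ph])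
    else
      if rhyme ≠ [] then pvA_loop rest (rhyme ++ [ph]) else pvA_loop rest rhyme

def get_final_phonology (phon : String) : List String :=
  match pvA_loop (PySem.Str.split₀ phon) [] with
  | none => []  -- ValueError (≥ 2 stress markers); excluded by Pre_
  | some rhyme =>
    let nsylls := ((PySem.Str.split₀ phon).filter pvLastIsDigit).length
    if nsylls = 1 then rhyme.filter pvLastIsDigit else rhyme

-- ===== PORT B =====
def get_final_phonology_alt (phon : String) : List String :=
  let tokens := PySem.Str.split₀ phon
  let stress := ((PySem.List.enumerate tokens 0).filter (fun p => PySem.Str.endswith p.2 "1")).map Prod.fst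
  if stress.length > 1 then []  -- ValueError; excluded by Pre_
  else
    let rhyme := match stress with
      | [] => []
      | i :: _ => PySem.List.slice tokens (some i) none   -- tokens[stress[0]:]
    let digit_final := tokens.filter pvLastIsDigit
    if digit_final.length = 1 then rhyme.filter pvLastIsDigit else rhyme

-- ===== PRECONDITION & SPEC =====
-- A raises ValueError when phon.split() contains two or more tokens ending in '1'; those inputs are excluded.
def Pre_get_final_phonology (phon : String) : Prop :=
  ((PySem.Str.split₀ phon).filter (fun t => PySem.Str.endswith t "1")).length ≤ 1
instance (phon : String) : Decidable (Pre_get_final_phonology phon) := by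
  unfold Pre_get_final_phonology; infer_instance

def pvWitness_get_final_phonology : String := "K AH1 T"

def Spec_get_final_phonology (phon : String) (out : List String) : Prop := out = get_final_phonology_alt phon
instance (phon : String) (out : List String) : Decidable (Spec_get_final_phonology phon out) := by unfold Spec_get_final_phonology; infer_instance

-- ===== CLAIM (what is proved, stated in full; the proofs are below) =====
def Claim_equal_get_final_phonology : Prop := ∀ (phon : String), Dom_get_final_phonology phon → Pre_get_final_phonology phon → Spec_get_final_phonology phon (get_final_phonology phon)

-- ===== LEMMAS AND PROOFS =====

-- abbreviations used only by the proofs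
def pvP (t : String) : Bool := PySem.Str.endswith t "1"

def pvStress (ts : List String) (s : Int) : List Int :=
  ((PySem.List.enumerate ts s).filter (fun p => PySem.Str.endswith p.2 "1")).map Prod.fst

theorem pvDropWhile_append (pre ts : List String)
    (h : ∀ t ∈ pre, pvP t = false) :
    (pre ++ ts).dropWhile (fun t => !pvP t) = ts.dropWhile (fun t => !pvP t) := by
  induction pre with
  | nil => rfl
  | cons a l ih =>
    have ha : pvP a = false := h a (List.mem_cons_self ..)
    rw [List.cons_append, List.dropWhile_cons, ha]
    simp only [Bool.not_false, if_pos]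
    exact ih (fun t ht => h t (List.mem_cons_of_mem _ ht))

-- Once the stress marker is found, A appends every remaining token (no further marker).
theorem pvA_loop_nonempty (ts : List String) :
    ∀ rhyme : List String, rhyme ≠ [] →
      (∀ t ∈ ts, pvP t = false) →
      pvA_loop ts rhyme = some (rhyme ++ ts) := by
  induction ts with
  | nil => intro rhyme h _; simp [pvA_loop]
  | cons ph rest ih =>
    intro rhyme h hall
    have hph : pvP ph = false := hall ph (List.mem_cons_self ..)
    rw [pvA_loop, if_neg (by simp [pvP] at hph; simp [hph]), if_pos h]
    rw [ih _ (by simp) (fun t ht => hall t (List.mem_cons_of_mem _ ht))]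
    simp

-- Under Pre_, A's loop returns exactly the tail from the first stress-marked token (dropWhile).
theorem pvA_loop_eq_dropWhile (ts : List String) :
    (ts.filter pvP).length ≤ 1 →
      pvA_loop ts [] = some (ts.dropWhile (fun t => !pvP t)) := by
  induction ts with
  | nil => intro _; simp [pvA_loop]
  | cons ph rest ih =>
    intro hle
    rw [List.filter_cons] at hle
    by_cases hph : pvP ph = true
    · rw [if_pos hph, List.length_cons] at hle
      have hrest : ∀ t ∈ rest, pvP t = false := by
        have : (rest.filter pvP).length = 0 := by omega
        rw [List.length_eq_zero_iff, List.filter_eq_nil_iff] at this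
        intro t ht; simpa using this t ht
      rw [pvA_loop, if_pos (by simpa [pvP] using hph), if_neg (by simp), List.nil_append]
      rw [pvA_loop_nonempty rest [ph] (by simp) hrest]
      rw [List.dropWhile_cons, hph]
      simp
    · rw [if_neg hph] at hle
      rw [pvA_loop, if_neg (by simp [pvP] at hph; simp [hph]), if_neg (by simp)]
      have hph' : pvP ph = false := by revert hph; simp
      rw [ih hle, List.dropWhile_cons, hph']
      simp

-- B's rhyme, with the already-scanned (marker-free) prefix made explicit.
theorem pvB_gen (ts : List String) :
    ∀ pre : List String, (∀ t ∈ pre, pvP t = false) →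
      (match pvStress ts (pre.length : Int) with
        | [] => ([] : List String)
        | i :: _ => PySem.List.slice (pre ++ ts) (some i) none)
        = (pre ++ ts).dropWhile (fun t => !pvP t) := by
  induction ts with
  | nil =>
    intro pre hpre
    simp only [pvStress, PySem.List.enumerate_nil, List.filter_nil, List.map_nil, List.append_nil]
    rw [List.dropWhile_eq_nil_iff.mpr (by intro t ht; simp [hpre t ht])]
  | cons t rest ih =>
    intro pre hpre
    rw [pvDropWhile_append pre (t :: rest) hpre, List.dropWhile_cons]
    by_cases h : pvP t = true
    · have hs : pvStress (t :: rest) (pre.length : Int)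
          = (pre.length : Int) :: pvStress rest ((pre.length : Int) + 1) := by
        rw [pvStress, PySem.List.enumerate_cons, List.filter_cons, if_pos (by simpa [pvP] using h), List.map_cons]
        rfl
      rw [hs, h]
      simp only [Bool.not_true, Bool.false_eq_true, if_false]
      rw [PySem.List.slice_from_natCast, List.drop_left]
    · have hs : pvStress (t :: rest) (pre.length : Int)
          = pvStress rest (((pre ++ [t]).length : Int)) := by
        rw [pvStress, PySem.List.enumerate_cons, List.filter_cons,
          if_neg (by simp [pvP] at h; simp [h])]
        rw [pvStress]
        congr 1
        simp
      simp only [Bool.not_eq_true] at h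
      rw [hs, h]
      simp only [Bool.not_false, if_pos]
      have hpre' : ∀ x ∈ pre ++ [t], pvP x = false := by
        intro x hx
        rcases List.mem_append.mp hx with hx | hx
        · exact hpre x hx
        · simp only [List.mem_singleton] at hx; subst hx; exact h
      have := ih (pre ++ [t]) hpre'
      rw [pvDropWhile_append (pre ++ [t]) rest hpre'] at this
      simp only [List.append_assoc, List.singleton_append] at this
      exact this

-- the stress-index list has one entry per stress-marked token, for any start
theorem pvStress_length (ts : List String) :
    ∀ s : Int, (pvStress ts s).length = (ts.filter pvP).length := by
  induction ts with
  | nil => intro s; simp [pvStress, PySem.List.enumerate_nil]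
  | cons t rest ih =>
    intro s
    rw [pvStress, PySem.List.enumerate_cons, List.filter_cons, List.filter_cons]
    by_cases h : pvP t = true
    · rw [if_pos (by simpa [pvP] using h), if_pos h, List.map_cons, List.length_cons, List.length_cons]
      exact congrArg (· + 1) (ih (s + 1))
    · rw [if_neg (by simp [pvP] at h; simp [h]), if_neg h]
      exact ih (s + 1)

-- ===== VERDICT (by name: the statement is the Claim_ definition above) =====
theorem get_final_phonology_spec : Claim_equal_get_final_phonology := by
  intro phon _ hpre
  unfold Spec_get_final_phonology get_final_phonology get_final_phonology_alt
  unfold Pre_get_final_phonology at hpre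
  rw [pvA_loop_eq_dropWhile _ hpre]
  have hpre' : ((PySem.Str.split₀ phon).filter pvP).length ≤ 1 := hpre
  have hlen := pvStress_length (PySem.Str.split₀ phon) 0
  have hB := pvB_gen (PySem.Str.split₀ phon) [] (by intro t ht; simp at ht)
  simp only [List.length_nil, Nat.cast_zero, List.nil_append] at hB
  rw [if_neg (by rw [show (((PySem.List.enumerate (PySem.Str.split₀ phon) 0).filter
        (fun p => PySem.Str.endswith p.2 "1")).map Prod.fst) = pvStress (PySem.Str.split₀ phon) 0 from rfl, hlen]; omega)]
  rw [show (((PySem.List.enumerate (PySem.Str.split₀ phon) 0).filter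
        (fun p => PySem.Str.endswith p.2 "1")).map Prod.fst) = pvStress (PySem.Str.split₀ phon) 0 from rfl, hB]
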